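-- pv_equiv track=rewrite | github.com/MashaKosher/System-Anallyze-And-Machine-Modeling | lab1/parameter_analysis.py | find_optimal_parameters
-- ===== SOURCE A (Python) =====
-- from typing import List, Tuple, Dict
--
-- def gcd(a: int, b: int) -> int:
--     """Наибольший общий делитель"""
--     while b:
--         a, b = b, a % b
--     return a
--
-- def get_prime_factors(n: int) -> List[int]:
--     """Получение списка простых делителей числа"""
--     factors = []
--     d = 2
--     while d * d <= n:
--         while n % d == 0:
--             if d not in factors:
--                 factors.append(d)
--             n //= d
--         d += 1
--     if n > 1:
--         factors.append(n)
--     return factors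
--
-- def check_hull_conditions(a: int, c: int, m: int) -> Dict[str, bool]:
--     """
--     Проверка условий Халла для максимального периода
--
--     Returns:
--         Словарь с результатами проверки каждого условия
--     """
--     results = {}
--
--     # Условие 1: gcd(c, m) = 1
--     results['gcd_c_m'] = gcd(c, m) == 1
--
--     # Условие 2: a ≡ 1 (mod p) для всех простых делителей p числа m
--     prime_factors = get_prime_factors(m)
--     results['prime_factors_condition'] = all((a - 1) % p == 0 for p in prime_factors)
--     results['prime_factors'] = prime_factors
--
--     # Условие 3: a ≡ 1 (mod 4) если m ≡ 0 (mod 4)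
--     if m % 4 == 0:
--         results['mod4_condition'] = (a - 1) % 4 == 0
--     else:
--         results['mod4_condition'] = True  # Условие не применимо
--
--     results['all_conditions_met'] = (
--         results['gcd_c_m'] and
--         results['prime_factors_condition'] and
--         results['mod4_condition']
--     )
--
--     return results
--
-- def find_optimal_parameters(m: int, max_attempts: int = 1000) -> List[Tuple[int, int, int]]:
--     """
--     Поиск оптимальных параметров (a, c) для заданного модуля m
--
--     Returns:
--         Список кортежей (a, c, expected_period)
--     """
--     optimal_params = []
--
--     # Для смешанного генератора ищем параметры с максимальным периодом m
--     for a in range(2, min(m, max_attempts)):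
--         for c in range(1, min(m, 100)):  # Ограничиваем поиск c
--             if gcd(c, m) == 1:  # Первое условие Халла
--                 conditions = check_hull_conditions(a, c, m)
--                 if conditions['all_conditions_met']:
--                     optimal_params.append((a, c, m))
--                     if len(optimal_params) >= 10:  # Ограничиваем количество найденных параметров
--                         break
--         if len(optimal_params) >= 10:
--             break
--
--     return optimal_params
-- ===== SOURCE B (Python) =====
-- def find_optimal_parameters(m: int, max_attempts: int = 1000):
--     """Closed-form search: qualifying a's form the arithmetic progression
--     a = 1 (mod lcm(prime factors of m, and 4 if 4 | m)), so enumerate just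
--     enough of that progression and pair it with the precomputed coprime c's."""
--     def gcd(x, y):
--         return x if y == 0 else gcd(y, x % y)
--     # distinct prime factors of m (trial division, m factored once)
--     primes = []
--     n, d = m, 2
--     while d * d <= n:
--         if n % d == 0:
--             primes.append(d)
--             while n % d == 0:
--                 n //= d
--         d += 1
--     if n > 1:
--         primes.append(n)
--     good_c = [c for c in range(1, min(m, 100)) if gcd(c, m) == 1]
--     if not good_c:
--         return []
--     L = 4 if m % 4 == 0 else 1
--     for p in primes:
--         L = L * p // gcd(L, p)
--     first = L + 1 if L > 1 else 2
--     a_count = -(-10 // len(good_c))  # ceil(10/len): enough a's for 10 triples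
--     good_a = range(first, min(m, max_attempts), L)[:a_count]
--     return [(a, c, m) for a in good_a for c in good_c][:10]
-- ===== Notes on version B (the rewrite author's own statement) =====
-- stated objective: faster
-- what changed: B replaces A's scan of every (a,c) pair (which re-factors m and re-runs the Hull checks per pair) by a closed form: it factors m once, characterises the qualifying a's as the arithmetic progression a ≡ 1 (mod lcm of m's prime factors and 4 when 4|m), and takes the first 10 triples from the product of just enough of that progression with the precomputed coprime c list.
import Mathlib
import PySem

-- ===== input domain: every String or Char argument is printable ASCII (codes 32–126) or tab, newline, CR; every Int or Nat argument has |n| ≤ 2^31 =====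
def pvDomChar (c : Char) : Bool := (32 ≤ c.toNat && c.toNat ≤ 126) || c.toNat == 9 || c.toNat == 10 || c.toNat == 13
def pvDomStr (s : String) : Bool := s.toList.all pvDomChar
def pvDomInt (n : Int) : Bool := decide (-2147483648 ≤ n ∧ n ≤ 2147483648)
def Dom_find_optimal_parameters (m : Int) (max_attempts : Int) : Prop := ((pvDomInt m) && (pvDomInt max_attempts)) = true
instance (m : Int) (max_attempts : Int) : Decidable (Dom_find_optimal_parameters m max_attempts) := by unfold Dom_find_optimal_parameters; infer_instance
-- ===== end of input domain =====

-- B finds the qualifying a's in closed form (the progression a ≡ 1 mod the lcm of m's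
-- prime factors, and 4 when 4 | m) instead of scanning every (a, c) pair (objective: faster).


-- ===== PORT A =====

-- bounds on Python floor division, used only for termination of the loops below
theorem pvFloordiv_bounds (n d : Int) (hn : 0 < n) (hd : 2 ≤ d) :
    0 ≤ PySem.Int.floordiv n d ∧ PySem.Int.floordiv n d < n := by
  constructor
  · exact (PySem.Int.le_floordiv_iff_mul_le (by omega)).mpr (by nlinarith)
  · exact (PySem.Int.floordiv_lt_iff_lt_mul (by omega)).mpr (by nlinarith)

-- termination measures, named so every loop can cite them (used only in decreasing_by)
theorem pvModAbs_lt (x y : Int) (h : ¬ y = 0) :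
    (PySem.Int.mod x y).natAbs < y.natAbs := by
  have h1 := PySem.Int.mod_nonneg x (b := y)
  have h2 := PySem.Int.mod_lt x (b := y)
  have h3 := PySem.Int.mod_neg_bounds x (b := y)
  rcases lt_trichotomy y 0 with hy | hy | hy
  · have := h3 hy; omega
  · omega
  · have := h1 hy; have := h2 hy; omega

theorem pvFloordivNat_lt (n d : Int) (h : 0 < n ∧ 2 ≤ d ∧ PySem.Int.mod n d = 0) :
    (PySem.Int.floordiv n d).toNat < n.toNat := by
  have := pvFloordiv_bounds n d h.1 h.2.1
  omega

theorem pvOuterMeas_lt (n m d : Int) (hm : m ≤ n) (h : 2 ≤ d ∧ d * d ≤ n) :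
    (m + 1 - (d + 1)).toNat < (n + 1 - d).toNat := by
  have h2 : 2 * d ≤ d * d := mul_le_mul_of_nonneg_right h.1 (by omega)
  omega

-- Source A's module-level `gcd`: `while b: a, b = b, a % b; return a`
def pvGcd (a b : Int) : Int :=
  if h : b ≠ 0 then pvGcd b (PySem.Int.mod a b) else a
termination_by b.natAbs
decreasing_by
  exact pvModAbs_lt a b h

-- inner `while n % d == 0` loop of A's get_prime_factors (carries the dedup-append acc)
-- (the `0 < n ∧ 2 ≤ d` conjuncts only make the recursion total; they hold at every call)
def pvFacAInner (n d : Int) (acc : List Int) : Int × List Int :=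
  if h : 0 < n ∧ 2 ≤ d ∧ PySem.Int.mod n d = 0 then
    pvFacAInner (PySem.Int.floordiv n d) d (if d ∈ acc then acc else acc ++ [d])
  else (n, acc)
termination_by n.toNat
decreasing_by
  exact pvFloordivNat_lt n d h

theorem pvFacAInner_fst_le (n d : Int) (acc : List Int) : (pvFacAInner n d acc).1 ≤ n := by
  rw [pvFacAInner]
  by_cases h : 0 < n ∧ 2 ≤ d ∧ PySem.Int.mod n d = 0
  · rw [dif_pos h]
    have hb := pvFloordiv_bounds n d h.1 h.2.1
    have ih := pvFacAInner_fst_le (PySem.Int.floordiv n d) d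
      (if d ∈ acc then acc else acc ++ [d])
    omega
  · rw [dif_neg h]
termination_by n.toNat
decreasing_by
  exact pvFloordivNat_lt n d h

-- outer `while d * d <= n` loop of A's get_prime_factors (`2 ≤ d` holds at every call)
def pvFacAOuter (n d : Int) (acc : List Int) : List Int :=
  if h : 2 ≤ d ∧ d * d ≤ n then
    let p := pvFacAInner n d acc
    pvFacAOuter p.1 (d + 1) p.2
  else if 1 < n then acc ++ [n] else acc
termination_by (n + 1 - d).toNat
decreasing_by
  exact pvOuterMeas_lt n _ d (pvFacAInner_fst_le n d acc) h

-- A's get_prime_factors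
def pvPrimeFactorsA (n : Int) : List Int := pvFacAOuter n 2 []

-- A's check_hull_conditions, collapsed to its 'all_conditions_met' entry
-- (the dict holds exactly these booleans; this flag is the only value A reads)
def pvCheckHull (a c m : Int) : Bool :=
  let gcd_c_m := pvGcd c m == 1
  let pfc := (pvPrimeFactorsA m).all (fun p => PySem.Int.mod (a - 1) p == 0)
  let mod4 := if PySem.Int.mod m 4 == 0 then PySem.Int.mod (a - 1) 4 == 0 else true
  gcd_c_m && pfc && mod4

-- inner `for c in range(...)` loop of A, with the `break` at 10 found parameters
def pvInnerA (m a : Int) : List Int → List (Int × Int × Int) → List (Int × Int × Int)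
  | [], acc => acc
  | c :: rest, acc =>
    if pvGcd c m == 1 then
      if pvCheckHull a c m then
        let acc' := acc ++ [(a, c, m)]
        if 10 ≤ acc'.length then acc' else pvInnerA m a rest acc'
      else pvInnerA m a rest acc
    else pvInnerA m a rest acc

-- outer `for a in range(...)` loop of A
def pvOuterA (m : Int) : List Int → List (Int × Int × Int) → List (Int × Int × Int)
  | [], acc => acc
  | a :: rest, acc =>
    let acc' := pvInnerA m a (PySem.List.pyRange 1 (min m 100) 1) acc
    if 10 ≤ acc'.length then acc' else pvOuterA m rest acc'

def find_optimal_parameters (m : Int) (max_attempts : Int) : List (Int × Int × Int) :=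
  pvOuterA m (PySem.List.pyRange 2 (min m max_attempts) 1) []

-- ===== PORT B =====

-- Source B's local recursive gcd: `x if y == 0 else gcd(y, x % y)`
def altGcd (x y : Int) : Int :=
  if h : y = 0 then x else altGcd y (PySem.Int.mod x y)
termination_by y.natAbs
decreasing_by
  exact pvModAbs_lt x y h

-- Source B's `while n % d == 0: n //= d` (guard conjuncts only for totality; true at each call)
def altStrip (n d : Int) : Int :=
  if h : 0 < n ∧ 2 ≤ d ∧ PySem.Int.mod n d = 0 then
    altStrip (PySem.Int.floordiv n d) d
  else n
termination_by n.toNat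
decreasing_by
  exact pvFloordivNat_lt n d h

theorem altStrip_le (n d : Int) : altStrip n d ≤ n := by
  rw [altStrip]
  by_cases h : 0 < n ∧ 2 ≤ d ∧ PySem.Int.mod n d = 0
  · rw [dif_pos h]
    have hb := pvFloordiv_bounds n d h.1 h.2.1
    have ih := altStrip_le (PySem.Int.floordiv n d) d
    omega
  · rw [dif_neg h]
termination_by n.toNat
decreasing_by
  exact pvFloordivNat_lt n d h

-- Source B's trial-division factor loop, producing the distinct prime list front-first
def altFac (n d : Int) : List Int :=
  if h : 2 ≤ d ∧ d * d ≤ n then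
    if PySem.Int.mod n d = 0 then d :: altFac (altStrip n d) (d + 1)
    else altFac n (d + 1)
  else if 1 < n then [n] else []
termination_by (n + 1 - d).toNat
decreasing_by
  · exact pvOuterMeas_lt n _ d (altStrip_le n d) h
  · exact pvOuterMeas_lt n n d le_rfl h

-- Source B's `L = L * p // gcd(L, p)` fold step
def altLcmStep (x p : Int) : Int := PySem.Int.floordiv (x * p) (altGcd x p)

def find_optimal_parameters_alt (m : Int) (max_attempts : Int) : List (Int × Int × Int) :=
  let primes := altFac m 2
  let good_c := (PySem.List.pyRange 1 (min m 100) 1).filter (fun c => altGcd c m == 1)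
  if good_c.isEmpty then []
  else
    let L := primes.foldl altLcmStep (if PySem.Int.mod m 4 == 0 then 4 else 1)
    let first := if L > 1 then L + 1 else 2
    let aCount := -(PySem.Int.floordiv (-10) good_c.length)
    let good_a := (PySem.List.pyRange first (min m max_attempts) L).take aCount.toNat
    (good_a.flatMap (fun a => good_c.map (fun c => (a, c, m)))).take 10

-- ===== PRECONDITION & SPEC =====
def Spec_find_optimal_parameters (m : Int) (max_attempts : Int) (out : List (Int × Int × Int)) : Prop := out = find_optimal_parameters_alt m max_attempts
instance (m : Int) (max_attempts : Int) (out : List (Int × Int × Int)) : Decidable (Spec_find_optimal_parameters m max_attempts out) := by unfold Spec_find_optimal_parameters; infer_instance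

-- ===== CLAIM (what is proved, stated in full; the proofs are below) =====
def Claim_equal_find_optimal_parameters : Prop := ∀ (m : Int) (max_attempts : Int), Dom_find_optimal_parameters m max_attempts → Spec_find_optimal_parameters m max_attempts (find_optimal_parameters m max_attempts)

-- ===== LEMMAS AND PROOFS =====

-- the a-only part of A's Hull check, with B's factor list substituted
def pvHoisted (m a : Int) : Bool :=
  (altFac m 2).all (fun p => PySem.Int.mod (a - 1) p == 0) &&
    (if PySem.Int.mod m 4 == 0 then PySem.Int.mod (a - 1) 4 == 0 else true)

-- altGcd is the same Euclid recursion as A's gcd (branches flipped)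
theorem altGcd_eq (x y : Int) : altGcd x y = pvGcd x y := by
  rw [altGcd, pvGcd]
  by_cases h : y = 0
  · rw [dif_pos h, dif_neg (by omega)]
  · rw [dif_neg h, dif_pos h]
    exact altGcd_eq y (PySem.Int.mod x y)
termination_by y.natAbs
decreasing_by
  exact pvModAbs_lt x y h

-- A's dedup-append factor loop produces B's cons-built factor list
theorem pvFacAInner_mem (n d : Int) (acc : List Int) (hd : d ∈ acc) :
    pvFacAInner n d acc = (altStrip n d, acc) := by
  rw [pvFacAInner, altStrip]
  by_cases h : 0 < n ∧ 2 ≤ d ∧ PySem.Int.mod n d = 0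
  · rw [dif_pos h, dif_pos h, if_pos hd]
    exact pvFacAInner_mem (PySem.Int.floordiv n d) d acc hd
  · rw [dif_neg h, dif_neg h]
termination_by n.toNat
decreasing_by
  exact pvFloordivNat_lt n d h

theorem pvFacAInner_not_mem (n d : Int) (acc : List Int) (hd : d ∉ acc) :
    pvFacAInner n d acc =
      (altStrip n d, if 0 < n ∧ 2 ≤ d ∧ PySem.Int.mod n d = 0 then acc ++ [d] else acc) := by
  by_cases h : 0 < n ∧ 2 ≤ d ∧ PySem.Int.mod n d = 0
  · rw [pvFacAInner, dif_pos h, altStrip, dif_pos h, if_neg hd, if_pos h]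
    exact pvFacAInner_mem _ _ _ (by simp)
  · rw [pvFacAInner, dif_neg h, altStrip, dif_neg h, if_neg h]

theorem pvFacA_eq (n d : Int) (acc : List Int) (hinv : ∀ x ∈ acc, x < d) :
    pvFacAOuter n d acc = acc ++ altFac n d := by
  rw [pvFacAOuter, altFac]
  by_cases h : 2 ≤ d ∧ d * d ≤ n
  · rw [dif_pos h, dif_pos h]
    have hd : d ∉ acc := fun hx => absurd (hinv d hx) (by omega)
    by_cases hm : PySem.Int.mod n d = 0
    · rw [if_pos hm, pvFacAInner_not_mem n d acc hd,
        if_pos ⟨by nlinarith [h.1, h.2], h.1, hm⟩]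
      rw [pvFacA_eq (altStrip n d) (d + 1) (acc ++ [d]) ?_]
      · simp
      · intro x hx
        rcases List.mem_append.mp hx with h' | h'
        · exact lt_trans (hinv x h') (by omega)
        · simp at h'; omega
    · rw [if_neg hm, pvFacAInner_not_mem n d acc hd, if_neg (by tauto),
        show altStrip n d = n from by rw [altStrip, dif_neg (by tauto)]]
      exact pvFacA_eq n (d + 1) acc (fun x hx => lt_trans (hinv x hx) (by omega))
  · rw [dif_neg h, dif_neg h]
    split <;> simp
termination_by (n + 1 - d).toNat
decreasing_by
  all_goals
    have h1 := altStrip_le n d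
    have h2 : 2 * d ≤ d * d := by nlinarith [h.1]
    omega

-- every entry of B's factor list is at least 2
theorem altFac_two_le (n d : Int) (hd : 2 ≤ d) : ∀ x ∈ altFac n d, 2 ≤ x := by
  rw [altFac]
  by_cases h : 2 ≤ d ∧ d * d ≤ n
  · rw [dif_pos h]
    by_cases hm : PySem.Int.mod n d = 0
    · rw [if_pos hm]
      intro x hx
      rcases List.mem_cons.mp hx with h' | h'
      · omega
      · exact altFac_two_le (altStrip n d) (d + 1) (by omega) x h'
    · rw [if_neg hm]
      exact altFac_two_le n (d + 1) (by omega)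
  · rw [dif_neg h]
    intro x hx
    split at hx
    · simp at hx; omega
    · simp at hx
termination_by (n + 1 - d).toNat
decreasing_by
  all_goals
    have h1 := altStrip_le n d
    have h2 : 2 * d ≤ d * d := by nlinarith [h.1]
    omega

-- A's check_hull flag factors into the gcd test and the a-only hoisted condition
theorem checkHull_eq (a c m : Int) :
    pvCheckHull a c m = ((pvGcd c m == 1) && pvHoisted m a) := by
  simp only [pvCheckHull, pvHoisted, pvPrimeFactorsA, pvFacA_eq m 2 [] (by simp),
    List.nil_append]
  cases h4 : (PySem.Int.mod m 4 == 0) <;> simp [Bool.and_assoc]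

-- ----- A's break-at-10 loops are `take 10` of the full product list -----

theorem innerA_eq (m a : Int) (cs : List Int) (acc : List (Int × Int × Int))
    (hacc : acc.length < 10) :
    pvInnerA m a cs acc =
      (acc ++ (if pvHoisted m a then
        (cs.filter (fun c => pvGcd c m == 1)).map (fun c => (a, c, m)) else [])).take 10 := by
  induction cs generalizing acc with
  | nil =>
      rw [List.filter_nil, List.map_nil, ite_self, List.append_nil,
        List.take_of_length_le (by omega)]
      rfl
  | cons c rest ih =>
      simp only [pvInnerA, List.append_nil]
      by_cases hg : (pvGcd c m == 1) = true
      · rw [if_pos hg, checkHull_eq, hg, Bool.true_and, List.filter_cons, if_pos hg,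
          List.map_cons]
        by_cases hh : pvHoisted m a = true
        · rw [if_pos hh, if_pos hh]
          conv_rhs => rw [List.append_cons]
          by_cases h10 : 10 ≤ (acc ++ [(a, c, m)]).length
          · rw [if_pos h10, List.take_append_of_le_length (by omega),
              List.take_of_length_le (by simp at h10 ⊢; omega)]
          · rw [if_neg h10, ih _ (by simp at h10 ⊢; omega), if_pos hh]
        · rw [if_neg hh, if_neg hh, ih _ hacc, if_neg hh]
      · rw [if_neg hg, List.filter_cons, if_neg hg, ih _ hacc]

theorem outerA_eq (m : Int) (as : List Int) (acc : List (Int × Int × Int))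
    (hacc : acc.length < 10) :
    pvOuterA m as acc =
      (acc ++ as.flatMap (fun a => if pvHoisted m a then
        ((PySem.List.pyRange 1 (min m 100) 1).filter (fun c => pvGcd c m == 1)).map
          (fun c => (a, c, m)) else [])).take 10 := by
  induction as generalizing acc with
  | nil =>
      rw [List.flatMap_nil, List.append_nil, List.take_of_length_le (by omega)]
      rfl
  | cons a rest ih =>
      simp only [pvOuterA]
      rw [innerA_eq m a _ acc hacc, List.flatMap_cons]
      by_cases h10 : 10 ≤ (acc ++ (if pvHoisted m a then
          ((PySem.List.pyRange 1 (min m 100) 1).filter (fun c => pvGcd c m == 1)).map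
            (fun c => (a, c, m)) else [])).length
      · rw [if_pos (by simp only [List.length_take]; omega), ← List.append_assoc,
          List.take_append_of_le_length h10]
      · rw [if_neg (by simp only [List.length_take]; omega),
          List.take_of_length_le (by omega), ← List.append_assoc]
        exact ih _ (by omega)

-- generic: flatMap of a guarded row is flatMap over the filtered list
theorem flatMap_if_filter {al : Type} (p : Int → Bool) (f : Int → List al) (l : List Int) :
    l.flatMap (fun a => if p a then f a else []) = (l.filter p).flatMap f := by
  induction l with
  | nil => rfl
  | cons x xs ih =>
      by_cases hx : p x <;> simp [List.filter_cons, hx, ih]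

-- ----- B's gcd/lcm fold computes the lcm of the Hull moduli -----

theorem altGcd_natCast (x y : Int) (hx : 0 ≤ x) (hy : 0 ≤ y) :
    altGcd x y = (Nat.gcd y.toNat x.toNat : Int) := by
  rw [altGcd]
  by_cases h : y = 0
  · rw [dif_pos h]
    subst h
    simp [Int.toNat_of_nonneg hx]
  · rw [dif_neg h]
    have hy' : 0 < y := by omega
    have hm0 : 0 ≤ x % y := Int.emod_nonneg x (by omega)
    have hml : x % y < y := Int.emod_lt_of_pos x hy'
    rw [PySem.Int.mod_eq_emod_of_pos hy', altGcd_natCast y (x % y) hy hm0]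
    have hcast : (x % y).toNat = x.toNat % y.toNat := by
      have : ((x.toNat % y.toNat : Nat) : Int) = (x.toNat : Int) % (y.toNat : Int) := by
        push_cast
        rfl
      rw [Int.toNat_of_nonneg hx, Int.toNat_of_nonneg hy] at this
      omega
    rw [hcast, ← Nat.gcd_rec]
termination_by y.natAbs
decreasing_by
  omega

theorem altLcmStep_natCast (x p : Int) (hx : 0 < x) (hp : 0 < p) :
    altLcmStep x p = (Nat.lcm x.toNat p.toNat : Int) := by
  have hgpos : 0 < Nat.gcd x.toNat p.toNat := Nat.gcd_pos_of_pos_right _ (by omega)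
  rw [altLcmStep, altGcd_natCast x p (by omega) (by omega), Nat.gcd_comm,
    PySem.Int.floordiv_eq_ediv_of_pos (by exact_mod_cast hgpos)]
  have hmul : x * p = ((x.toNat * p.toNat : Nat) : Int) := by
    push_cast
    rw [Int.toNat_of_nonneg (by omega), Int.toNat_of_nonneg (by omega)]
  rw [hmul]
  have hdiv : (((x.toNat * p.toNat) / Nat.gcd x.toNat p.toNat : Nat) : Int) =
      ((x.toNat * p.toNat : Nat) : Int) / ((Nat.gcd x.toNat p.toNat : Nat) : Int) := by
    push_cast
    rfl
  rw [← hdiv]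
  rfl

theorem foldl_lcm_spec (ps : List Int) :
    ∀ x : Int, 0 < x → (∀ p ∈ ps, 2 ≤ p) →
      0 < ps.foldl altLcmStep x ∧
        ∀ z : Int, (ps.foldl altLcmStep x ∣ z ↔ x ∣ z ∧ ∀ p ∈ ps, p ∣ z) := by
  induction ps with
  | nil =>
      intro x hx _
      simpa using hx
  | cons p rest ih =>
      intro x hx hps
      have hp : 2 ≤ p := hps p (List.mem_cons_self ..)
      have hstep : altLcmStep x p = (Nat.lcm x.toNat p.toNat : Int) :=
        altLcmStep_natCast x p hx (by omega)
      have hlcm0 : Nat.lcm x.toNat p.toNat ≠ 0 := Nat.lcm_ne_zero (by omega) (by omega)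
      have hpos : 0 < altLcmStep x p := by
        rw [hstep]
        exact_mod_cast Nat.pos_of_ne_zero hlcm0
      have hstep_iff : ∀ z : Int, altLcmStep x p ∣ z ↔ x ∣ z ∧ p ∣ z := by
        intro z
        rw [hstep, Int.natCast_dvd,
          show x ∣ z ↔ x.toNat ∣ z.natAbs from by
            rw [← Int.natCast_dvd, Int.toNat_of_nonneg (by omega)],
          show p ∣ z ↔ p.toNat ∣ z.natAbs from by
            rw [← Int.natCast_dvd, Int.toNat_of_nonneg (by omega)]]
        constructor
        · intro hz
          exact ⟨dvd_trans (Nat.dvd_lcm_left _ _) hz, dvd_trans (Nat.dvd_lcm_right _ _) hz⟩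
        · intro hz
          exact Nat.lcm_dvd hz.1 hz.2
      obtain ⟨hP, hI⟩ := ih (altLcmStep x p) hpos (fun q hq => hps q (List.mem_cons_of_mem _ hq))
      refine ⟨by simpa [List.foldl_cons] using hP, fun z => ?_⟩
      rw [List.foldl_cons, hI z]
      constructor
      · rintro ⟨hstep', hrest'⟩
        obtain ⟨hx', hp'⟩ := (hstep_iff z).mp hstep'
        refine ⟨hx', fun q hq => ?_⟩
        rcases List.mem_cons.mp hq with rfl | hq
        · exact hp'
        · exact hrest' q hq
      · rintro ⟨hx', hall⟩
        exact ⟨(hstep_iff z).mpr ⟨hx', hall p (List.mem_cons_self ..)⟩,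
          fun q hq => hall q (List.mem_cons_of_mem _ hq)⟩

-- the lcm B folds up: all Hull moduli at once
def Lval (m : Int) : Int :=
  (altFac m 2).foldl altLcmStep (if PySem.Int.mod m 4 == 0 then 4 else 1)

theorem Lval_pos (m : Int) : 0 < Lval m :=
  (foldl_lcm_spec (altFac m 2) (if PySem.Int.mod m 4 == 0 then 4 else 1)
    (by split <;> omega) (altFac_two_le m 2 (by omega))).1

theorem hoisted_eq_decide (m a : Int) :
    pvHoisted m a = decide (Lval m ∣ (a - 1)) := by
  have hiff := (foldl_lcm_spec (altFac m 2) (if PySem.Int.mod m 4 == 0 then 4 else 1)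
    (by split <;> omega) (altFac_two_le m 2 (by omega))).2 (a - 1)
  by_cases hL : Lval m ∣ (a - 1)
  · obtain ⟨hinit, hall⟩ := hiff.mp hL
    rw [decide_eq_true hL]
    simp only [pvHoisted, Bool.and_eq_true, List.all_eq_true, beq_iff_eq,
      PySem.Int.mod_eq_zero_iff_dvd]
    refine ⟨fun p hp => hall p hp, ?_⟩
    by_cases hm4 : (4:Int) ∣ m
    · rw [if_pos hm4]
      have hc : (PySem.Int.mod m 4 == 0) = true := by
        simpa [PySem.Int.mod_eq_zero_iff_dvd] using hm4
      rw [if_pos hc] at hinit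
      simpa [PySem.Int.mod_eq_zero_iff_dvd] using hinit
    · rw [if_neg hm4]
  · rw [decide_eq_false hL]
    by_contra hne
    have htrue : pvHoisted m a = true := by
      revert hne
      cases pvHoisted m a <;> simp
    apply hL
    apply hiff.mpr
    simp only [pvHoisted, Bool.and_eq_true, List.all_eq_true, beq_iff_eq,
      PySem.Int.mod_eq_zero_iff_dvd] at htrue
    obtain ⟨hall, h4⟩ := htrue
    refine ⟨?_, hall⟩
    by_cases hm4 : (4:Int) ∣ m
    · have hc : (PySem.Int.mod m 4 == 0) = true := by
        simpa [PySem.Int.mod_eq_zero_iff_dvd] using hm4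
      rw [if_pos hc]
      rw [if_pos hm4] at h4
      simpa [PySem.Int.mod_eq_zero_iff_dvd] using h4
    · have hc : ¬ (PySem.Int.mod m 4 == 0) = true := by
        simpa [PySem.Int.mod_eq_zero_iff_dvd] using hm4
      rw [if_neg hc]
      exact one_dvd _

-- ----- pyRange with a positive step -----

theorem pyRange_pos_nil (a b s : Int) (hs : 0 < s) (hab : b ≤ a) :
    PySem.List.pyRange a b s = [] := by
  rw [PySem.List.pyRange_of_pos a b hs, if_neg (by omega)]
  rfl

theorem pyRange_pos_cons (a b s : Int) (hs : 0 < s) (hab : a < b) :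
    PySem.List.pyRange a b s = a :: PySem.List.pyRange (a + s) b s := by
  rw [PySem.List.pyRange_of_pos a b hs, PySem.List.pyRange_of_pos (a + s) b hs,
    if_pos hab]
  have e1 : (b - a + s - 1) / s = (b - a - 1) / s + 1 := by
    have h := Int.add_mul_ediv_right (b - a - 1) 1 (show s ≠ 0 by omega)
    rw [show b - a + s - 1 = b - a - 1 + 1 * s by ring, h]
  have h0 : 0 ≤ (b - a - 1) / s := Int.ediv_nonneg (by omega) (by omega)
  have hn : ((b - a + s - 1) / s).toNat =
      (if a + s < b then ((b - (a + s) + s - 1) / s).toNat else 0) + 1 := by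
    by_cases hc : a + s < b
    · rw [if_pos hc, show b - (a + s) + s - 1 = b - a - 1 by ring]
      omega
    · rw [if_neg hc]
      have : (b - a - 1) / s = 0 := Int.ediv_eq_zero_of_lt (by omega) (by omega)
      omega
  rw [hn, List.range_succ_eq_map, List.map_cons, List.map_map]
  simp only [Nat.cast_zero, mul_zero, add_zero, List.cons.injEq, true_and]
  apply List.map_congr_left
  intro k _
  simp only [Function.comp_apply, Nat.succ_eq_add_one]
  push_cast
  ring

-- the qualifying a's are exactly the arithmetic progression t, t+L, …
theorem filter_prog (L N s t : Int) (hL : 1 ≤ L) (ht : L ∣ (t - 1)) (hst : s ≤ t)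
    (hts : t < s + L) :
    (PySem.List.pyRange s N 1).filter (fun a => decide (L ∣ (a - 1))) =
      PySem.List.pyRange t N L := by
  by_cases hN : N ≤ s
  · rw [PySem.List.pyRange_one_eq_nil hN, pyRange_pos_nil t N L (by omega) (by omega)]
    rfl
  · rw [PySem.List.pyRange_one_cons (show s < N by omega), List.filter_cons]
    by_cases hts0 : t = s
    · subst hts0
      rw [if_pos (by simpa using ht), pyRange_pos_cons t N L (by omega) (by omega)]
      congr 1
      exact filter_prog L N (t + 1) (t + L) hL
        (by simpa [show t + L - 1 = t - 1 + L by ring] using dvd_add ht (dvd_refl L))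
        (by omega) (by omega)
    · have hnd : ¬ (L ∣ (s - 1)) := by
        intro hdvd
        have hts' : L ∣ (t - s) := by
          simpa [sub_sub_sub_cancel_right] using dvd_sub ht hdvd
        have := Int.le_of_dvd (by omega) hts'
        omega
      rw [if_neg (by simpa using hnd)]
      exact filter_prog L N (s + 1) t hL ht (by omega) (by omega)
termination_by (N - s).toNat
decreasing_by
  all_goals omega

-- truncating the progression before flatMap does not change the first 10 triples
theorem take_flatMap_take {al bl : Type} (f : al → List bl) (l : List al) (k g : Nat)
    (hg : ∀ a, (f a).length = g) (hkg : 10 ≤ k * g) :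
    ((l.take k).flatMap f).take 10 = (l.flatMap f).take 10 := by
  by_cases hk : l.length ≤ k
  · rw [List.take_of_length_le hk]
  · have hlen : ((l.take k).flatMap f).length = k * g := by
      rw [List.length_flatMap,
        show (fun a => (f a).length) = (fun _ : al => g) from funext hg,
        List.map_const', List.sum_replicate, smul_eq_mul, List.length_take]
      congr 1
      omega
    conv_rhs => rw [← List.take_append_drop k l, List.flatMap_append]
    rw [List.take_append_of_le_length (by omega)]

-- the whole equivalence, one input at a time
theorem main_eq (m ma : Int) :
    find_optimal_parameters m ma = find_optimal_parameters_alt m ma := by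
  have hA : find_optimal_parameters m ma =
      (((PySem.List.pyRange 2 (min m ma) 1).filter (fun a => pvHoisted m a)).flatMap
        (fun a => ((PySem.List.pyRange 1 (min m 100) 1).filter
          (fun c => pvGcd c m == 1)).map (fun c => (a, c, m)))).take 10 := by
    rw [find_optimal_parameters, outerA_eq m _ [] (by simp), List.nil_append,
      flatMap_if_filter]
  rw [hA]
  simp only [find_optimal_parameters_alt, altGcd_eq]
  by_cases hemp : ((PySem.List.pyRange 1 (min m 100) 1).filter
      (fun c => pvGcd c m == 1)).isEmpty
  · rw [if_pos hemp]
    rw [List.isEmpty_iff.mp hemp]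
    simp
  · rw [if_neg hemp]
    set gc := (PySem.List.pyRange 1 (min m 100) 1).filter (fun c => pvGcd c m == 1) with hgc
    have hg1 : 1 ≤ gc.length := by
      cases hnil : gc with
      | nil => rw [hnil] at hemp; simp at hemp
      | cons _ _ => simp [hnil]
    have hLpos := Lval_pos m
    have hfilter : (PySem.List.pyRange 2 (min m ma) 1).filter (fun a => pvHoisted m a) =
        PySem.List.pyRange (if Lval m > 1 then Lval m + 1 else 2) (min m ma) (Lval m) := by
      rw [List.filter_congr (fun x _ => hoisted_eq_decide m x)]
      by_cases h1 : Lval m > 1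
      · rw [if_pos h1]
        exact filter_prog (Lval m) (min m ma) 2 (Lval m + 1) (by omega)
          (by simpa using dvd_refl (Lval m)) (by omega) (by omega)
      · rw [if_neg h1]
        have hL1 : Lval m = 1 := by omega
        rw [hL1]
        exact filter_prog 1 (min m ma) 2 2 (by omega) (one_dvd _) le_rfl (by omega)
    rw [hfilter]
    set q := PySem.Int.floordiv (-10) (gc.length : Int) with hq
    have hql : q * (gc.length : Int) ≤ -10 :=
      (PySem.Int.le_floordiv_iff_mul_le (by exact_mod_cast hg1)).mp le_rfl
    have hqneg : q < 0 := by
      rw [hq]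
      refine (PySem.Int.floordiv_lt_iff_lt_mul (by exact_mod_cast hg1)).mpr ?_
      simp
    have hcast : (((-q).toNat : Int)) = -q := Int.toNat_of_nonneg (by omega)
    have hkg : 10 ≤ (-q).toNat * gc.length := by
      have h10 : (10 : Int) ≤ ((-q).toNat : Int) * (gc.length : Int) := by
        rw [hcast]; nlinarith
      exact_mod_cast h10
    exact (take_flatMap_take (fun a => gc.map (fun c => (a, c, m))) _ (-q).toNat gc.length
      (fun a => by simp) hkg).symm

-- ===== VERDICT (by name: the statement is the Claim_ definition above) =====
theorem find_optimal_parameters_spec : Claim_equal_find_optimal_parameters := by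
  intro m ma _
  unfold Spec_find_optimal_parameters
  exact main_eq m ma
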